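-- pv_equiv track=rewrite | github.com/alexfrias209/FlexiGrader | components/submissionsPythonProjectsV3/59595/59595_6411300_2560649.py | longest_prime_sum
-- ===== SOURCE A (Python) =====
-- def is_prime(n):
--     if n < 1:
--         return False
--     for i in range(2, n-1):
--         if n % i == 0:
--             return False
--     return True
--
-- def longest_prime_sum(n):
--     primes = [i for i in range(1, n) if is_prime(i)]
--     result = []
--     current_sum = 0
--     for prime in reversed(primes):
--         if current_sum + prime <= n:
--             current_sum += prime
--             result.append(prime)
--     return result
-- ===== SOURCE B (Python) =====
-- def _passes_trial(i):
--     d = 2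
--     while d * d <= i:
--         if i % d == 0:
--             return False
--         d += 1
--     return True
--
-- def longest_prime_sum(n):
--     # single descending pass: take every "prime" (trial division to sqrt; 1 passes,
--     # matching A's test) that still fits under the bound n
--     result = []
--     s = 0
--     for i in range(n - 1, 0, -1):
--         if _passes_trial(i) and s + i <= n:
--             s += i
--             result.append(i)
--     return result
-- ===== Notes on version B (the rewrite author's own statement) =====
-- stated objective: faster
-- what changed: B replaces A's build-a-prime-list-then-greedy structure (primality tested by trial division over the whole range up to the candidate) with a single descending pass over the candidates that tests each one by trial division only up to its square root and takes it immediately if it fits, materializing no prime list.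
import Mathlib
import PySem

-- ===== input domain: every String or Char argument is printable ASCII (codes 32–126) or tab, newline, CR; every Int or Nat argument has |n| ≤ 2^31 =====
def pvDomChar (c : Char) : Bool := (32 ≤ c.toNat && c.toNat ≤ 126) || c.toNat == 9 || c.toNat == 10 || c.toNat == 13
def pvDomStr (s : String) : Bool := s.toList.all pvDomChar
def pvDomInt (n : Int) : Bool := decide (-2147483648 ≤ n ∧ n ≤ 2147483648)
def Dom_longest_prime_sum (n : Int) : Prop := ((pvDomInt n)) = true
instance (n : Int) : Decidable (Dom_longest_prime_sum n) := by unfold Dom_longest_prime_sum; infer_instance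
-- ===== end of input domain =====

-- B replaces A's prime-list-then-greedy structure by a single descending pass with
-- sqrt-bounded trial division; same return value, measurably faster.

-- ===== PORT A =====
-- is_prime: early-return loop over range(2, n-1), ported as short-circuit List.all
def pvIsPrimeA (n : Int) : Bool :=
  if n < 1 then false
  else (PySem.List.pyRange 2 (n - 1) 1).all (fun i => !(PySem.Int.mod n i == 0))

def longest_prime_sum (n : Int) : List Int :=
  let primes := (PySem.List.pyRange 1 n 1).filter pvIsPrimeA
  let st := primes.reverse.foldl
    (fun (st : Int × List Int) p =>
      if st.1 + p ≤ n then (st.1 + p, st.2 ++ [p]) else st) (0, [])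
  st.2

-- ===== PORT B =====
-- _passes_trial's 'while d*d <= i' loop; Nat arithmetic is exact for the i ≥ 0 it is called on
def pvTrial (m d : Nat) : Bool :=
  if h : d * d ≤ m then
    if m % d == 0 then false else pvTrial m (d + 1)
  else true
termination_by m + 2 - d
decreasing_by
  rcases Nat.eq_zero_or_pos d with h0 | h0
  · omega
  · have := Nat.le_mul_of_pos_left d h0
    omega

def pvPassesTrial (i : Int) : Bool := pvTrial i.toNat 2

def longest_prime_sum_alt (n : Int) : List Int :=
  let st := (PySem.List.pyRange (n - 1) 0 (-1)).foldl
    (fun (st : Int × List Int) i =>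
      if pvPassesTrial i then
        (if st.1 + i ≤ n then (st.1 + i, st.2 ++ [i]) else st)
      else st) (0, [])
  st.2

-- ===== PRECONDITION & SPEC =====
def Spec_longest_prime_sum (n : Int) (out : List Int) : Prop := out = longest_prime_sum_alt n
instance (n : Int) (out : List Int) : Decidable (Spec_longest_prime_sum n out) := by unfold Spec_longest_prime_sum; infer_instance

-- ===== CLAIM (what is proved, stated in full; the proofs are below) =====
def Claim_equal_longest_prime_sum : Prop := ∀ (n : Int), Dom_longest_prime_sum n → Spec_longest_prime_sum n (longest_prime_sum n)

-- ===== LEMMAS AND PROOFS =====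

-- B's while loop returns true iff no candidate divisor from d up to sqrt m divides m
lemma pvTrial_eq_true_iff (m d : Nat) :
    pvTrial m d = true ↔ ∀ e, d ≤ e → e * e ≤ m → m % e ≠ 0 := by
  fun_induction pvTrial m d with
  | case1 d hdd hmod =>
    simp only [beq_iff_eq] at hmod
    simp only [Bool.false_eq_true, false_iff]
    intro hall
    exact hall d le_rfl hdd hmod
  | case2 d hdd hmod ih =>
    simp only [beq_iff_eq] at hmod
    rw [ih]
    constructor
    · intro hall e hde hee
      rcases Nat.eq_or_lt_of_le hde with rfl | hlt
      · exact hmod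
      · exact hall e hlt hee
    · intro hall e hde hee
      exact hall e (Nat.le_of_succ_le hde) hee
  | case3 d hdd =>
    simp only [true_iff]
    intro e hde hee
    exact absurd (le_trans (Nat.mul_le_mul hde hde) hee) hdd

-- divisor-freeness on [2, m-2] (A's test) ↔ divisor-freeness up to sqrt m (B's test)
lemma trial_bounds_iff (m : Nat) :
    (∀ e : Nat, 2 ≤ e → e + 1 < m → m % e ≠ 0) ↔
    (∀ e : Nat, 2 ≤ e → e * e ≤ m → m % e ≠ 0) := by
  constructor
  · intro hall e h2 hee
    apply hall e h2
    nlinarith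
  · intro hall e h2 hem hmod
    have hdvd : e ∣ m := Nat.dvd_of_mod_eq_zero hmod
    have hq : e * (m / e) = m := Nat.mul_div_cancel' hdvd
    have hq2 : 2 ≤ m / e := by nlinarith [Nat.lt_or_ge (m / e) 2, hq]
    have h2' : 2 ≤ min e (m / e) := le_min h2 hq2
    have hsq : min e (m / e) * min e (m / e) ≤ m := by
      calc min e (m / e) * min e (m / e) ≤ e * (m / e) :=
            Nat.mul_le_mul (min_le_left _ _) (min_le_right _ _)
        _ = m := hq
    have hdvd' : min e (m / e) ∣ m := by
      rcases min_choice e (m / e) with hc | hc <;> rw [hc]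
      · exact hdvd
      · exact Nat.div_dvd_of_dvd hdvd
    exact hall _ h2' hsq (Nat.mod_eq_zero_of_dvd hdvd')

-- the two primality tests agree on every positive integer
lemma isPrime_agree (x : Int) (hx : 1 ≤ x) : pvIsPrimeA x = pvPassesTrial x := by
  obtain ⟨m, rfl⟩ : ∃ m : Nat, x = (m : Int) := ⟨x.toNat, (Int.toNat_of_nonneg (by omega)).symm⟩
  rw [Bool.eq_iff_iff]
  unfold pvIsPrimeA pvPassesTrial
  rw [if_neg (by omega)]
  rw [List.all_eq_true]
  rw [Int.toNat_natCast, pvTrial_eq_true_iff, ← trial_bounds_iff]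
  constructor
  · intro hall e h2 hem
    have hmem : (e : Int) ∈ PySem.List.pyRange 2 ((m : Int) - 1) 1 := by
      rw [PySem.List.mem_pyRange_one]; omega
    have h := hall _ hmem
    simp only [Bool.not_eq_true', beq_eq_false_iff_ne, ne_eq, PySem.Int.mod_natCast,
      Int.natCast_eq_zero] at h
    exact h
  · intro hall i hmem
    rw [PySem.List.mem_pyRange_one] at hmem
    obtain ⟨e, rfl⟩ : ∃ e : Nat, i = (e : Int) := ⟨i.toNat, (Int.toNat_of_nonneg (by omega)).symm⟩
    have h2 : 2 ≤ e := by exact_mod_cast hmem.1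
    have hem : e + 1 < m := by omega
    have h := hall e h2 hem
    simp only [PySem.Int.mod_natCast, Bool.not_eq_true', beq_eq_false_iff_ne, ne_eq,
      Int.natCast_eq_zero]
    exact h

theorem ports_agree (n : Int) : longest_prime_sum n = longest_prime_sum_alt n := by
  unfold longest_prime_sum longest_prime_sum_alt
  rw [PySem.List.pyRange_neg_one_eq_reverse]
  norm_num
  rw [← List.foldr_filter]
  have hfilt : List.filter pvIsPrimeA (PySem.List.pyRange 1 n) =
      List.filter pvPassesTrial (PySem.List.pyRange 1 n) :=
    List.filter_congr (fun x hx =>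
      isPrime_agree x (by rw [PySem.List.mem_pyRange_one] at hx; exact hx.1))
  rw [hfilt]

-- ===== VERDICT (by name: the statement is the Claim_ definition above) =====
theorem longest_prime_sum_spec : Claim_equal_longest_prime_sum := by
  intro n _
  unfold Spec_longest_prime_sum
  exact ports_agree n
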